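-- pv_equiv track=rewrite | github.com/skyetomez/poisson-tile | pos_random.py | vert_lines
-- ===== SOURCE A (Python) =====
-- EDGE = 2000
--
-- def vert_lines(y_delta, vert_array):
--     counter = 0
--     add_y = 0
--     add_y = add_y + y_delta
--
--
--     for y in range(len(vert_array)):
--
--         if counter  == 0:
--             vert_array[y] = (0,add_y)
--             counter += 1
--         elif counter  == 1:
--             vert_array[y] = (EDGE, add_y)
--             counter += 1
--         else:
--             add_y = add_y + y_delta
--             vert_array[y] = (0,add_y)
--             counter = 1
--     return vert_array
-- ===== SOURCE B (Python) =====
-- EDGE = 2000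
--
-- def vert_lines(y_delta, vert_array):
--     # Pairwise pass: one running y accumulator, no cyclic counter.
--     # Builds a fresh list (A overwrites vert_array in place; return value identical).
--     n = len(vert_array)
--     out = []
--     add_y = 0
--     while n >= 2:
--         add_y += y_delta
--         out.append((0, add_y))
--         out.append((EDGE, add_y))
--         n -= 2
--     if n == 1:
--         out.append((0, add_y + y_delta))
--     return out
-- ===== Notes on version B (the rewrite author's own statement) =====
-- stated objective: simpler
-- what changed: Replaces the 3-state cyclic counter machine indexing into the array with a pairwise while-loop over the remaining length that appends both endpoints of each line from a single running y accumulator; B builds a fresh list instead of mutating vert_array in place (return value identical).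
import Mathlib
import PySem

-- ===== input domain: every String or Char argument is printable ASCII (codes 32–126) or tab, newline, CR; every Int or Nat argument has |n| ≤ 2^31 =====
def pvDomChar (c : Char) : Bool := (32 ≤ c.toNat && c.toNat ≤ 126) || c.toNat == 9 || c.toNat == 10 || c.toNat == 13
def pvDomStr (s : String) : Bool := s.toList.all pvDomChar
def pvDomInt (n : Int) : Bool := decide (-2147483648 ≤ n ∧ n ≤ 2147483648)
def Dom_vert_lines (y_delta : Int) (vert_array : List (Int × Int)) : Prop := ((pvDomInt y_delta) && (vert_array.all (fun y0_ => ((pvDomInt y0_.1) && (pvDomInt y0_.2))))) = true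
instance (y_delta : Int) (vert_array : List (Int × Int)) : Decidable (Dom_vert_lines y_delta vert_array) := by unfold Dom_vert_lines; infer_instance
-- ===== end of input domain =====

-- B replaces A's 3-state cyclic counter machine (which overwrites vert_array in place)
-- with a pairwise while-loop on the remaining length and a single running y accumulator,
-- appending to a fresh list; equivalence is about the RETURN value (A mutates its argument).


def EDGE : Int := 2000

-- ===== PORT A =====
-- one loop step of A: state = (counter, add_y, array)
def stepA (y_delta : Int) (st : Nat × Int × List (Int × Int)) (y : Nat) :
    Nat × Int × List (Int × Int) :=
  let counter := st.1
  let add_y := st.2.1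
  let arr := st.2.2
  if counter = 0 then (counter + 1, add_y, arr.set y (0, add_y))
  else if counter = 1 then (counter + 1, add_y, arr.set y (EDGE, add_y))
  else (1, add_y + y_delta, arr.set y (0, add_y + y_delta))

def vert_lines (y_delta : Int) (vert_array : List (Int × Int)) : List (Int × Int) :=
  ((List.range vert_array.length).foldl (stepA y_delta) (0, 0 + y_delta, vert_array)).2.2

-- ===== PORT B =====
-- the while loop of Source B: n = remaining length, add_y the accumulator, out the built list
def vertAltGo (y_delta : Int) (n : Nat) (add_y : Int) (out : List (Int × Int)) :
    List (Int × Int) :=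
  if n ≥ 2 then
    vertAltGo y_delta (n - 2) (add_y + y_delta)
      (out ++ [(0, add_y + y_delta), (EDGE, add_y + y_delta)])
  else if n = 1 then out ++ [(0, add_y + y_delta)]
  else out
termination_by n
decreasing_by omega

def vert_lines_alt (y_delta : Int) (vert_array : List (Int × Int)) : List (Int × Int) :=
  vertAltGo y_delta vert_array.length 0 []

-- ===== PRECONDITION & SPEC =====
def Spec_vert_lines (y_delta : Int) (vert_array : List (Int × Int)) (out : List (Int × Int)) : Prop := out = vert_lines_alt y_delta vert_array
instance (y_delta : Int) (vert_array : List (Int × Int)) (out : List (Int × Int)) : Decidable (Spec_vert_lines y_delta vert_array out) := by unfold Spec_vert_lines; infer_instance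

-- ===== CLAIM (what is proved, stated in full; the proofs are below) =====
def Claim_equal_vert_lines : Prop := ∀ (y_delta : Int) (vert_array : List (Int × Int)), Dom_vert_lines y_delta vert_array → Spec_vert_lines y_delta vert_array (vert_lines y_delta vert_array)

-- ===== LEMMAS AND PROOFS =====

-- the sequence of pairs A's machine writes: n steps from counter c, accumulator a
def mpat (d : Int) : Nat → Nat → Int → List (Int × Int)
  | 0, _, _ => []
  | n + 1, c, a =>
    if c = 0 then (0, a) :: mpat d n 1 a
    else if c = 1 then (EDGE, a) :: mpat d n 2 a
    else (0, a + d) :: mpat d n 1 (a + d)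

lemma take_succ_set {α : Type} (arr : List α) (j : Nat) (x : α) (h : j < arr.length) :
    (arr.set j x).take (j + 1) = arr.take j ++ [x] := by
  induction arr generalizing j with
  | nil => simp at h
  | cons hd tl ih =>
    cases j with
    | zero => simp
    | succ j => simp_all

lemma foldA_eq (d : Int) :
    ∀ (n j c : Nat) (a : Int) (arr : List (Int × Int)), arr.length = j + n →
      ((List.range' j n).foldl (stepA d) (c, a, arr)).2.2 = arr.take j ++ mpat d n c a := by
  intro n
  induction n with
  | zero =>
    intro j c a arr hlen
    have ht : arr.take j = arr := List.take_of_length_le (by omega)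
    simp [mpat, ht]
  | succ n ih =>
    intro j c a arr hlen
    have hj : j < arr.length := by omega
    rw [List.range'_succ, List.foldl_cons]
    by_cases hc0 : c = 0
    · have : stepA d (c, a, arr) j = (c + 1, a, arr.set j (0, a)) := by
        simp [stepA, hc0]
      rw [this, ih (j + 1) (c + 1) a _ (by simpa using by omega),
        take_succ_set _ _ _ hj, mpat]
      simp [hc0]
    · by_cases hc1 : c = 1
      · have : stepA d (c, a, arr) j = (c + 1, a, arr.set j (EDGE, a)) := by
          simp [stepA, hc1]
        rw [this, ih (j + 1) (c + 1) a _ (by simpa using by omega),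
          take_succ_set _ _ _ hj, mpat]
        simp [hc0, hc1]
      · have hst : stepA d (c, a, arr) j = (1, a + d, arr.set j (0, a + d)) := by
          simp only [stepA]
          rw [if_neg hc0, if_neg hc1]
        rw [hst, ih (j + 1) 1 (a + d) _ (by simpa using by omega),
          take_succ_set _ _ _ hj, mpat, if_neg hc0, if_neg hc1]
        simp

lemma vert_lines_eq_mpat (d : Int) (va : List (Int × Int)) :
    vert_lines d va = mpat d va.length 0 (0 + d) := by
  rw [vert_lines, List.range_eq_range', foldA_eq d va.length 0 0 (0 + d) va (by omega)]
  simp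

lemma mpat_two (d : Int) (n : Nat) (a : Int) : mpat d n 2 a = mpat d n 0 (a + d) := by
  cases n <;> simp [mpat]

lemma vertAltGo_eq_mpat (d : Int) :
    ∀ (n : Nat) (a : Int) (out : List (Int × Int)),
      vertAltGo d n a out = out ++ mpat d n 0 (a + d) := by
  intro n
  induction n using Nat.strong_induction_on with
  | _ n ih =>
    intro a out
    rw [vertAltGo]
    by_cases h2 : n ≥ 2
    · obtain ⟨m, rfl⟩ : ∃ m, n = m + 2 := ⟨n - 2, by omega⟩
      simp only [if_pos h2]
      rw [ih (m + 2 - 2) (by omega) (a + d)]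
      simp only [Nat.add_sub_cancel]
      rw [show mpat d (m + 2) 0 (a + d)
            = (0, a + d) :: (EDGE, a + d) :: mpat d m 2 (a + d) by simp [mpat],
        mpat_two]
      simp
    · simp only [if_neg h2]
      by_cases h1 : n = 1
      · subst h1; simp [mpat]
      · obtain rfl : n = 0 := by omega
        simp [mpat]

-- ===== VERDICT (by name: the statement is the Claim_ definition above) =====
theorem vert_lines_spec : Claim_equal_vert_lines := by
  intro d va _
  show vert_lines d va = vert_lines_alt d va
  rw [vert_lines_eq_mpat, vert_lines_alt, vertAltGo_eq_mpat]
  simp
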